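-- pv_equiv track=rewrite | github.com/KalpShah999/PersonaResearch | LIWC.py | group_categories
-- ===== SOURCE A (Python) =====
-- demographic_categories = ['male', 'female', 'netspeak', 'pronoun']
--
-- experiences_categories = ['percept', 'bio', 'work', 'home', 'money', 'relig', 'death']
--
-- attitude_categories = ['discrep', 'achievement', 'power', 'reward', 'risk', 'affect']
--
-- relations_categories = ['family', 'friend', 'affiliation']
--
-- def group_categories(counts):
--     """Group LIWC categories into broader conceptual categories.
--
--     Groups the detailed LIWC categories into four main groups:
--     - Demographic (identity)
--     - Experiences (work/occupation, education, hobbies, habits)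
--     - Attitude/opinion (values, beliefs, mental state)
--     - Relations (social, family, friends)
--
--     Parameters
--     ----------
--     counts : dict
--         Dictionary with counts for each specific LIWC category.
--
--     Returns
--     -------
--     dict
--         Dictionary with counts for the four main category groups.
--     """
--     group_counts = {'demographic': 0, 'experiences': 0, 'attitude': 0, 'relations': 0}
--
--     for category, count in counts.items():
--         category = category.strip().lower()
--         if category in demographic_categories:
--             group_counts['demographic'] += count
--         elif category in experiences_categories:
--             group_counts['experiences'] += count
--         elif category in attitude_categories:
--             group_counts['attitude'] += count
--         elif category in relations_categories:
--             group_counts['relations'] += count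
--
--     return group_counts
-- ===== SOURCE B (Python) =====
-- demographic_categories = ['male', 'female', 'netspeak', 'pronoun']
-- experiences_categories = ['percept', 'bio', 'work', 'home', 'money', 'relig', 'death']
-- attitude_categories = ['discrep', 'achievement', 'power', 'reward', 'risk', 'affect']
-- relations_categories = ['family', 'friend', 'affiliation']
--
--
-- def group_categories(counts):
--     # One staged pass per group: sum the counts whose normalized name is in that
--     # group's list. Correct because the four lists are pairwise disjoint, so A's
--     # elif dispatch counts each item in exactly the one group a per-group sum finds.
--     def total(cats):
--         return sum(c for k, c in counts.items() if k.strip().lower() in cats)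
--     return {'demographic': total(demographic_categories),
--             'experiences': total(experiences_categories),
--             'attitude': total(attitude_categories),
--             'relations': total(relations_categories)}
-- ===== Notes on version B (the rewrite author's own statement) =====
-- stated objective: alternative
-- what changed: Replaces A's single pass that dispatches each item through an elif cascade into a mutable dict with four independent per-group summations (one filtered sum per group, dict literal built from the results); correct because the four category lists are disjoint.
import Mathlib
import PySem

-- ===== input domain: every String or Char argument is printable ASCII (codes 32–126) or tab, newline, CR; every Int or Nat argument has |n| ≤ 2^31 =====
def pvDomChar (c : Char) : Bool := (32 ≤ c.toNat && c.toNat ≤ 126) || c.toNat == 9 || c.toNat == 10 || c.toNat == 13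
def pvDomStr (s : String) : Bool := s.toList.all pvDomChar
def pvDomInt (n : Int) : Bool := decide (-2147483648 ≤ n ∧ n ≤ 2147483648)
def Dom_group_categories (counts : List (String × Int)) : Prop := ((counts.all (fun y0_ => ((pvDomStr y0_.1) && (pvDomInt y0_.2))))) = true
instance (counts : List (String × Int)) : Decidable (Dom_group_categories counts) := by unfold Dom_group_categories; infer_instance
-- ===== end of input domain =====

-- B replaces A's single dict-accumulating dispatch pass with four independent per-group filtered sums (valid since the category lists are disjoint); equal output, alternative decomposition.


-- ===== PORT A =====
def demographic_categories : List String := ["male", "female", "netspeak", "pronoun"]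
def experiences_categories : List String := ["percept", "bio", "work", "home", "money", "relig", "death"]
def attitude_categories : List String := ["discrep", "achievement", "power", "reward", "risk", "affect"]
def relations_categories : List String := ["family", "friend", "affiliation"]

-- body of A's for-loop (the elif cascade), one step of the fold
def aStep (d : PySem.Dict String Int) (p : String × Int) : PySem.Dict String Int :=
  let category := PySem.Str.lower (PySem.Str.strip p.1)
  if demographic_categories.contains category then d.modify "demographic" 0 (· + p.2)
  else if experiences_categories.contains category then d.modify "experiences" 0 (· + p.2)
  else if attitude_categories.contains category then d.modify "attitude" 0 (· + p.2)
  else if relations_categories.contains category then d.modify "relations" 0 (· + p.2)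
  else d

def group_categories (counts : List (String × Int)) : List (String × Int) :=
  let init : PySem.Dict String Int :=
    PySem.Dict.mk [("demographic", 0), ("experiences", 0), ("attitude", 0), ("relations", 0)]
  (counts.foldl aStep init).items

-- ===== PORT B =====
-- sum(c for k, c in counts.items() if k.strip().lower() in cats)
def bTotal (counts : List (String × Int)) (cats : List String) : Int :=
  counts.foldl (fun acc p =>
    if cats.contains (PySem.Str.lower (PySem.Str.strip p.1)) then acc + p.2 else acc) 0

def group_categories_alt (counts : List (String × Int)) : List (String × Int) :=
  [("demographic", bTotal counts demographic_categories),
   ("experiences", bTotal counts experiences_categories),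
   ("attitude", bTotal counts attitude_categories),
   ("relations", bTotal counts relations_categories)]

-- ===== PRECONDITION & SPEC =====
def Spec_group_categories (counts : List (String × Int)) (out : List (String × Int)) : Prop := out = group_categories_alt counts
instance (counts : List (String × Int)) (out : List (String × Int)) : Decidable (Spec_group_categories counts out) := by unfold Spec_group_categories; infer_instance

-- ===== CLAIM (what is proved, stated in full; the proofs are below) =====
def Claim_equal_group_categories : Prop := ∀ (counts : List (String × Int)), Dom_group_categories counts → Spec_group_categories counts (group_categories counts)

-- ===== LEMMAS AND PROOFS =====

-- B's filtered sum started from an arbitrary accumulator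
lemma bTotal_shift (counts : List (String × Int)) (cats : List String) (a : Int) :
    counts.foldl (fun acc p =>
      if cats.contains (PySem.Str.lower (PySem.Str.strip p.1)) then acc + p.2 else acc) a
    = a + counts.foldl (fun acc p =>
      if cats.contains (PySem.Str.lower (PySem.Str.strip p.1)) then acc + p.2 else acc) 0 := by
  induction counts generalizing a with
  | nil => simp
  | cons p rest ih =>
    simp only [List.foldl_cons]
    rw [ih (if cats.contains (PySem.Str.lower (PySem.Str.strip p.1)) then a + p.2 else a),
        ih (if cats.contains (PySem.Str.lower (PySem.Str.strip p.1)) then 0 + p.2 else 0)]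
    split_ifs <;> ring

lemma bTotal_cons (p : String × Int) (rest : List (String × Int)) (cats : List String) :
    bTotal (p :: rest) cats
    = (if cats.contains (PySem.Str.lower (PySem.Str.strip p.1)) then p.2 else 0) + bTotal rest cats := by
  simp only [bTotal, List.foldl_cons]
  rw [bTotal_shift rest cats (if cats.contains (PySem.Str.lower (PySem.Str.strip p.1)) then 0 + p.2 else 0)]
  split_ifs <;> ring

-- A's accumulator dict, parameterised by the four running totals
def pvD (a b c r : Int) : PySem.Dict String Int :=
  PySem.Dict.mk [("demographic", a), ("experiences", b), ("attitude", c), ("relations", r)]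

-- membership in one category list excludes the others (the four lists are disjoint)
lemma not_exp_of_dem {s : String} (h : demographic_categories.contains s = true) :
    experiences_categories.contains s = false := by
  revert h; simp [demographic_categories, experiences_categories]
  rintro (h|h|h|h) <;> simp [h]
lemma not_att_of_dem {s : String} (h : demographic_categories.contains s = true) :
    attitude_categories.contains s = false := by
  revert h; simp [demographic_categories, attitude_categories]
  rintro (h|h|h|h) <;> simp [h]
lemma not_rel_of_dem {s : String} (h : demographic_categories.contains s = true) :
    relations_categories.contains s = false := by
  revert h; simp [demographic_categories, relations_categories]
  rintro (h|h|h|h) <;> simp [h]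
lemma not_att_of_exp {s : String} (h : experiences_categories.contains s = true) :
    attitude_categories.contains s = false := by
  revert h; simp [experiences_categories, attitude_categories]
  rintro (h|h|h|h|h|h|h) <;> simp [h]
lemma not_rel_of_exp {s : String} (h : experiences_categories.contains s = true) :
    relations_categories.contains s = false := by
  revert h; simp [experiences_categories, relations_categories]
  rintro (h|h|h|h|h|h|h) <;> simp [h]
lemma not_rel_of_att {s : String} (h : attitude_categories.contains s = true) :
    relations_categories.contains s = false := by
  revert h; simp [attitude_categories, relations_categories]
  rintro (h|h|h|h|h|h) <;> simp [h]

-- invariant of A's loop: the dict's items are the four starting values plus B's per-group sums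
lemma fold_items (counts : List (String × Int)) (a b c r : Int) :
    (counts.foldl aStep (pvD a b c r)).items
    = [("demographic", a + bTotal counts demographic_categories),
       ("experiences", b + bTotal counts experiences_categories),
       ("attitude", c + bTotal counts attitude_categories),
       ("relations", r + bTotal counts relations_categories)] := by
  induction counts generalizing a b c r with
  | nil =>
    simp [bTotal]
    rfl
  | cons p rest ih =>
    rw [List.foldl_cons,
        bTotal_cons, bTotal_cons, bTotal_cons, bTotal_cons]
    by_cases h1 : demographic_categories.contains (PySem.Str.lower (PySem.Str.strip p.1))
    · have hs : aStep (pvD a b c r) p = pvD (a + p.2) b c r := by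
        unfold aStep; simp only [h1, if_true]; rfl
      rw [hs, ih]
      simp only [h1, not_exp_of_dem h1, not_att_of_dem h1, not_rel_of_dem h1, if_true,
        Bool.false_eq_true, if_false, List.cons.injEq, Prod.mk.injEq, true_and, and_true]
      and_intros <;> ring
    · by_cases h2 : experiences_categories.contains (PySem.Str.lower (PySem.Str.strip p.1))
      · have hs : aStep (pvD a b c r) p = pvD a (b + p.2) c r := by
          unfold aStep; simp only [h1, h2, if_true, Bool.false_eq_true, if_false]; rfl
        rw [hs, ih]
        simp only [h1, h2, not_att_of_exp h2, not_rel_of_exp h2, if_true,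
          Bool.false_eq_true, if_false, List.cons.injEq, Prod.mk.injEq, true_and, and_true]
        and_intros <;> ring
      · by_cases h3 : attitude_categories.contains (PySem.Str.lower (PySem.Str.strip p.1))
        · have hs : aStep (pvD a b c r) p = pvD a b (c + p.2) r := by
            unfold aStep; simp only [h1, h2, h3, if_true, Bool.false_eq_true, if_false]; rfl
          rw [hs, ih]
          simp only [h1, h2, h3, not_rel_of_att h3, if_true,
            Bool.false_eq_true, if_false, List.cons.injEq, Prod.mk.injEq, true_and, and_true]
          and_intros <;> ring
        · by_cases h4 : relations_categories.contains (PySem.Str.lower (PySem.Str.strip p.1))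
          · have hs : aStep (pvD a b c r) p = pvD a b c (r + p.2) := by
              unfold aStep; simp only [h1, h2, h3, h4, if_true, Bool.false_eq_true, if_false]; rfl
            rw [hs, ih]
            simp only [h1, h2, h3, h4, if_true,
              Bool.false_eq_true, if_false, List.cons.injEq, Prod.mk.injEq, true_and, and_true]
            and_intros <;> ring
          · have hs : aStep (pvD a b c r) p = pvD a b c r := by
              unfold aStep; simp only [h1, h2, h3, h4, Bool.false_eq_true, if_false]
            rw [hs, ih]
            simp only [h1, h2, h3, h4, Bool.false_eq_true, if_false, zero_add, add_zero]

-- ===== VERDICT (by name: the statement is the Claim_ definition above) =====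
theorem group_categories_spec : Claim_equal_group_categories := by
  intro counts _
  show group_categories counts = group_categories_alt counts
  have h := fold_items counts 0 0 0 0
  simp only [group_categories, group_categories_alt]
  rw [show (PySem.Dict.mk [("demographic", (0:Int)), ("experiences", 0), ("attitude", 0), ("relations", 0)]) = pvD 0 0 0 0 from rfl]
  rw [h]
  simp
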